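-- pv_equiv track=rewrite | github.com/mscroggs/connect4 | core/game_module.py | four_in_a_row
-- ===== SOURCE A (Python) =====
-- def four_in_a_row(row):
--     run = 0
--     for j,val in enumerate(row):
--         if j==0:
--             run += 1
--         elif val == row[j-1] and val!=0:
--             run += 1
--         else:
--             run = 1
--         if run == 4 and val!=0:
--             return val
--     return None
-- ===== SOURCE B (Python) =====
-- def four_in_a_row(row):
--     for i in range(len(row) - 3):
--         v = row[i]
--         if v != 0 and v == row[i + 1] == row[i + 2] == row[i + 3]:
--             return v
--     return None
-- ===== Notes on version B (the rewrite author's own statement) =====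
-- stated objective: simpler
-- what changed: Replaces the maintained run-length accumulator (with its j==0 special case and previous-element lookup) by a direct scan of fixed windows of four positions, returning the first window whose four entries are equal and nonzero.
import Mathlib
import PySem

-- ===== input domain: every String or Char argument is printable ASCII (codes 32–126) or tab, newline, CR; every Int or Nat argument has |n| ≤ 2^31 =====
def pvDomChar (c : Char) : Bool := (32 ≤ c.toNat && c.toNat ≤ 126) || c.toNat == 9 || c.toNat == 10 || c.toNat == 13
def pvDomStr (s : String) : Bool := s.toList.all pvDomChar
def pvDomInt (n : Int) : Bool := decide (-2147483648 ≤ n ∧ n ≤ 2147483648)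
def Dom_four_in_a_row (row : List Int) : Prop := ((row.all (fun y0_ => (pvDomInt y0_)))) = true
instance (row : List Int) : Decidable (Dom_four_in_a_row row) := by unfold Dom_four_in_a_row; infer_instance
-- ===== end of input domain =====

-- B replaces A's run-length accumulator by direct fixed-window comparisons of four positions (objective: simpler).

-- ===== PORT A =====
-- body of `for j,val in enumerate(row)` with state `run`; the early return becomes recursion
def fourAuxA (row : List Int) : List (Int × Int) → Int → Option Int
  | [], _ => none
  | (j, val) :: rest, run =>
    let run' : Int :=
      if j = 0 then run + 1
      else if PySem.List.pyGet? row (j - 1) = some val ∧ val ≠ 0 then run + 1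
      else 1
    if run' = 4 ∧ val ≠ 0 then some val
    else fourAuxA row rest run'

def four_in_a_row (row : List Int) : Option Int :=
  fourAuxA row (PySem.List.enumerate row) 0

-- ===== PORT B =====
-- body of `for i in range(len(row) - 3)`; the early return becomes recursion
def fourAuxB (row : List Int) : List Int → Option Int
  | [] => none
  | i :: rest =>
    match PySem.List.pyGet? row i with
    | none => none  -- unreachable: every i produced by range(len(row)-3) is in range
    | some v =>
      if v ≠ 0 ∧ PySem.List.pyGet? row (i + 1) = some v ∧
          PySem.List.pyGet? row (i + 2) = some v ∧ PySem.List.pyGet? row (i + 3) = some v then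
        some v
      else fourAuxB row rest

def four_in_a_row_alt (row : List Int) : Option Int :=
  fourAuxB row (PySem.List.pyRange 0 ((row.length : Int) - 3) 1)

-- ===== PRECONDITION & SPEC =====
def Spec_four_in_a_row (row : List Int) (out : Option Int) : Prop := out = four_in_a_row_alt row
instance (row : List Int) (out : Option Int) : Decidable (Spec_four_in_a_row row out) := by unfold Spec_four_in_a_row; infer_instance

-- ===== CLAIM (what is proved, stated in full; the proofs are below) =====
def Claim_equal_four_in_a_row : Prop := ∀ (row : List Int), Dom_four_in_a_row row → Spec_four_in_a_row row (four_in_a_row row)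

-- ===== LEMMAS AND PROOFS =====

-- pure window scan, the common reference point of both ports
def WB : List Int → Option Int
  | a :: b :: c :: d :: rest =>
    if a ≠ 0 ∧ b = a ∧ c = a ∧ d = a then some a else WB (b :: c :: d :: rest)
  | _ => none

-- pure form of A's loop after the j = 0 step: prev is the previous element, run the accumulator
def goA (prev run : Int) : List Int → Option Int
  | [] => none
  | v :: rest =>
    if v = prev ∧ v ≠ 0 then
      if run = 3 then some v else goA v (run + 1) rest
    else goA v 1 rest

theorem WB_short (l : List Int) (h : l.length < 4) : WB l = none := by
  rcases l with _ | ⟨a, _ | ⟨b, _ | ⟨c, _ | ⟨d, r⟩⟩⟩⟩ <;> simp [WB] at h ⊢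
  omega

theorem WB_cons_of_not_fire (x : Int) (l : List Int)
    (h : ∀ b c d r, l = b :: c :: d :: r → ¬(x ≠ 0 ∧ b = x ∧ c = x ∧ d = x)) :
    WB (x :: l) = WB l := by
  rcases l with _ | ⟨b, _ | ⟨c, _ | ⟨d, r⟩⟩⟩
  · simp [WB]
  · simp [WB]
  · simp [WB]
  · rw [WB, if_neg (h b c d r rfl)]

theorem WB_pad (k : Nat) : ∀ (prev v : Int) (rest : List Int), k ≤ 3 →
    ¬(v = prev ∧ v ≠ 0) →
    WB (List.replicate k prev ++ v :: rest) = WB (v :: rest) := by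
  induction k with
  | zero => intro prev v rest _ _; simp
  | succ n ih =>
    intro prev v rest hk hc
    have hn : n ≤ 2 := by omega
    rw [List.replicate_succ, List.cons_append]
    rw [WB_cons_of_not_fire prev _ ?_]
    · exact ih prev v rest (by omega) hc
    · intro b c d r heq hfire
      obtain ⟨h0, hb, hcc, hd⟩ := hfire
      have hv : (List.replicate n prev ++ v :: rest)[n]? = some v := by
        rw [List.getElem?_append_right (by simp)]
        simp
      rw [heq] at hv
      interval_cases n
      · simp only [List.getElem?_cons_zero, Option.some.injEq] at hv
        exact hc ⟨by rw [← hv, hb], by rw [← hv, hb]; exact h0⟩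
      · simp only [List.getElem?_cons_succ, List.getElem?_cons_zero, Option.some.injEq] at hv
        exact hc ⟨by rw [← hv, hcc], by rw [← hv, hcc]; exact h0⟩
      · simp only [List.getElem?_cons_succ, List.getElem?_cons_zero, Option.some.injEq] at hv
        exact hc ⟨by rw [← hv, hd], by rw [← hv, hd]; exact h0⟩

theorem goA_eq_WB (suf : List Int) : ∀ (prev run : Int), 1 ≤ run → run ≤ 3 →
    goA prev run suf = WB (List.replicate run.toNat prev ++ suf) := by
  induction suf with
  | nil =>
    intro prev run h1 h3
    rw [goA, WB_short]
    simp; omega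
  | cons v rest ih =>
    intro prev run h1 h3
    rw [goA]
    by_cases hc : v = prev ∧ v ≠ 0
    · rw [if_pos hc]
      by_cases h4 : run = 3
      · subst h4
        rw [if_pos rfl]
        have hrep : List.replicate (3:Int).toNat prev ++ v :: rest
            = v :: v :: v :: v :: rest := by
          rcases hc with ⟨hv, _⟩; subst hv; rfl
        rw [hrep, WB, if_pos ⟨hc.2, rfl, rfl, rfl⟩]
      · rw [if_neg h4, ih v (run + 1) (by omega) (by omega)]
        congr 1
        rcases hc with ⟨hv, _⟩; subst hv
        have h' : (run + 1).toNat = run.toNat + 1 := by omega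
        rw [h', List.replicate_succ']
        simp
    · rw [if_neg hc, ih v 1 (by omega) (by omega)]
      rw [WB_pad run.toNat prev v rest (by omega) hc]
      rfl

-- bridge A: the index/enumerate port computes goA once the first element has been consumed
theorem bridgeA (suf : List Int) : ∀ (pre : List Int) (prev run : Int), pre ≠ [] →
    pre.getLast? = some prev →
    fourAuxA (pre ++ suf) (PySem.List.enumerate suf (pre.length : Int)) run = goA prev run suf := by
  induction suf with
  | nil => intro pre prev run _ _; simp [PySem.List.enumerate, fourAuxA, goA]
  | cons v rest ih =>
    intro pre prev run hpre hlast
    rw [PySem.List.enumerate_cons, fourAuxA, goA]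
    have hj : ((pre.length : Int) = 0) = False := by
      simp [List.length_eq_zero_iff]; exact hpre
    have hprev : PySem.List.pyGet? (pre ++ v :: rest) ((pre.length : Int) - 1) = some prev := by
      have hl : 0 < pre.length := List.length_pos_of_ne_nil hpre
      have : ((pre.length : Int) - 1) = ((pre.length - 1 : Nat) : Int) := by omega
      rw [this, PySem.List.pyGet?_natCast, List.getElem?_append_left (by omega),
        ← List.getLast?_eq_getElem?, hlast]
    simp only [hj, if_false, hprev, Option.some.injEq]
    have harr : pre ++ v :: rest = (pre ++ [v]) ++ rest := by simp
    have hstep : ((pre.length : Int) + 1) = (((pre ++ [v]).length : Nat) : Int) := by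
      simp
    by_cases hc : v = prev ∧ v ≠ 0
    · have hcond : (prev = v ∧ v ≠ 0) := ⟨hc.1.symm, hc.2⟩
      rw [if_pos hcond, if_pos hc]
      by_cases h4 : run = 3
      · subst h4
        rw [if_pos (⟨by norm_num, hc.2⟩ : (3 : Int) + 1 = 4 ∧ v ≠ 0), if_pos rfl]
      · rw [if_neg (by omega), if_neg h4, harr, hstep,
          ih (pre ++ [v]) v (run + 1) (by simp) (by simp)]
    · have hcond : ¬(prev = v ∧ v ≠ 0) := fun h => hc ⟨h.1.symm, h.2⟩
      rw [if_neg hcond, if_neg hc, if_neg (by norm_num), harr, hstep,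
        ih (pre ++ [v]) v 1 (by simp) (by simp)]

-- bridge B: the range/window port computes the pure window scan of the suffix
theorem bridgeB (suf : List Int) : ∀ (pre : List Int),
    fourAuxB (pre ++ suf) (PySem.List.pyRange (pre.length : Int)
      ((pre.length : Int) + (suf.length : Int) - 3) 1) = WB suf := by
  induction suf with
  | nil =>
    intro pre
    rw [PySem.List.pyRange_one_eq_nil (by simp), fourAuxB, WB_short]
    simp
  | cons a tail ih =>
    intro pre
    rcases tail with _ | ⟨b, _ | ⟨c, _ | ⟨d, r⟩⟩⟩
    · rw [PySem.List.pyRange_one_eq_nil (by simp), fourAuxB]; rfl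
    · rw [PySem.List.pyRange_one_eq_nil (by simp), fourAuxB]; rfl
    · rw [PySem.List.pyRange_one_eq_nil (by simp), fourAuxB]; rfl
    · -- at least four elements from position pre.length
      have hlen : ((a :: b :: c :: d :: r).length : Int) = (r.length : Int) + 4 := by
        simp; omega
      rw [PySem.List.pyRange_one_cons (by omega), fourAuxB]
      have h0 : PySem.List.pyGet? (pre ++ a :: b :: c :: d :: r) ((pre.length : Int))
          = some a := PySem.List.pyGet?_append_length pre (b :: c :: d :: r) a
      have e1 : pre ++ a :: b :: c :: d :: r = (pre ++ [a]) ++ b :: c :: d :: r := by simp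
      have e2 : pre ++ a :: b :: c :: d :: r = (pre ++ [a, b]) ++ c :: d :: r := by simp
      have e3 : pre ++ a :: b :: c :: d :: r = (pre ++ [a, b, c]) ++ d :: r := by simp
      have h1 : PySem.List.pyGet? (pre ++ a :: b :: c :: d :: r) ((pre.length : Int) + 1)
          = some b := by
        rw [e1]
        have : ((pre.length : Int) + 1) = (((pre ++ [a]).length : Nat) : Int) := by simp
        rw [this]; exact PySem.List.pyGet?_append_length (pre ++ [a]) (c :: d :: r) b
      have h2 : PySem.List.pyGet? (pre ++ a :: b :: c :: d :: r) ((pre.length : Int) + 2)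
          = some c := by
        rw [e2]
        have : ((pre.length : Int) + 2) = (((pre ++ [a, b]).length : Nat) : Int) := by simp
        rw [this]; exact PySem.List.pyGet?_append_length (pre ++ [a, b]) (d :: r) c
      have h3 : PySem.List.pyGet? (pre ++ a :: b :: c :: d :: r) ((pre.length : Int) + 3)
          = some d := by
        rw [e3]
        have : ((pre.length : Int) + 3) = (((pre ++ [a, b, c]).length : Nat) : Int) := by simp
        rw [this]; exact PySem.List.pyGet?_append_length (pre ++ [a, b, c]) r d
      rw [h0, h1, h2, h3]
      simp only [Option.some.injEq]
      by_cases hc : a ≠ 0 ∧ b = a ∧ c = a ∧ d = a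
      · rw [if_pos hc, WB, if_pos hc]
      · rw [if_neg hc, WB, if_neg hc]
        have hstep : ((pre.length : Int) + 1) = (((pre ++ [a]).length : Nat) : Int) := by simp
        have hbnd : (pre.length : Int) + ((a :: b :: c :: d :: r).length : Int) - 3
            = ((pre ++ [a]).length : Int) + ((b :: c :: d :: r).length : Int) - 3 := by
          simp; omega
        rw [e1, hstep, hbnd]
        exact ih (pre ++ [a])

-- both ports compute the pure window scan
theorem portA_eq_WB (row : List Int) : four_in_a_row row = WB row := by
  rcases row with _ | ⟨v, rest⟩
  · simp [four_in_a_row, PySem.List.enumerate, fourAuxA, WB]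
  · rw [four_in_a_row, PySem.List.enumerate_cons]
    have hstep : fourAuxA (v :: rest) ((0, v) :: PySem.List.enumerate rest (0 + 1)) 0
        = fourAuxA (v :: rest) (PySem.List.enumerate rest (0 + 1)) (0 + 1) := by
      simp [fourAuxA]
    have h1 : ((0 : Int) + 1) = (([v] : List Int).length : Int) := by simp
    have h2 : v :: rest = [v] ++ rest := rfl
    rw [hstep, h2, h1, bridgeA rest [v] v _ (by simp) (by simp)]
    rw [goA_eq_WB rest v _ (by simp) (by simp)]
    rfl

theorem portB_eq_WB (row : List Int) : four_in_a_row_alt row = WB row := by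
  have h := bridgeB row []
  simpa [four_in_a_row_alt] using h

-- ===== VERDICT (by name: the statement is the Claim_ definition above) =====
theorem four_in_a_row_spec : Claim_equal_four_in_a_row := by
  intro row _
  unfold Spec_four_in_a_row
  rw [portA_eq_WB, portB_eq_WB]
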